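-- pv_equiv track=rewrite | github.com/DavidRodSeg/FrequentItemsets | utils/conversions.py | transaction_to_binary
-- ===== SOURCE A (Python) =====
-- def transaction_to_binary(transaction_data):
--     """
--     Converts a dataset in the transaction data format into a
--     binary array.
--
--     Arguments:
--         transaction_data (list): Dataset in the transaction data format.
--         Example: [['apple', 'banana', 'carrot'],['banana'],...]
--
--     Returns:
--         list: Dataset in the form of a binary array.
--     """
--     binary_data = []
--
--     flattened_data = [data for row in transaction_data for data in row]
--     header = sorted(set(flattened_data))
--     # binary_data.append(header)
--
--     for transaction in transaction_data:
--         binary_row = [1 if item in transaction else 0 for item in header]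
--         binary_data.append(binary_row)
--
--     return binary_data, header
-- ===== SOURCE B (Python) =====
-- def transaction_to_binary(transaction_data):
--     header = sorted({item for row in transaction_data for item in row})
--     col_index = {item: i for i, item in enumerate(header)}
--     binary_data = []
--     for transaction in transaction_data:
--         row = [0] * len(header)
--         for item in transaction:
--             row[col_index[item]] = 1
--         binary_data.append(row)
--     return binary_data, header
-- ===== Notes on version B (the rewrite author's own statement) =====
-- stated objective: faster
-- what changed: Inverted the traversal: instead of scanning the whole header per transaction with an O(len(transaction)) membership test per header item, B precomputes a column-index dict and scatters 1s from each transaction's own items into a zero-filled row.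
import Mathlib
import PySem

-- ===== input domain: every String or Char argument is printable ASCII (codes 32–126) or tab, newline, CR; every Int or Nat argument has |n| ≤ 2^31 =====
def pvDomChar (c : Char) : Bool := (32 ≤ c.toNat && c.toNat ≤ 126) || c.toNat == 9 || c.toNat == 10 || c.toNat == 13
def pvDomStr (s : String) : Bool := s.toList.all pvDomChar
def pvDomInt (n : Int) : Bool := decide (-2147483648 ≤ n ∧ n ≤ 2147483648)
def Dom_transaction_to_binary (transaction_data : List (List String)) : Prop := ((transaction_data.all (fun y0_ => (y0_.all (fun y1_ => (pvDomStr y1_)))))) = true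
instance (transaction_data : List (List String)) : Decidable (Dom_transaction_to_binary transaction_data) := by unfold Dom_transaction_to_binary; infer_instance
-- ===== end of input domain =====

-- B inverts the traversal: a column-index dict and a zero row per transaction, scattering 1s from
-- the transaction's items, instead of testing each header item's membership in the transaction (faster).

-- ===== PORT A =====
def transaction_to_binary (transaction_data : List (List String)) : List (List Int) × List String :=
  -- flattened_data = [data for row in transaction_data for data in row]
  let flattened_data : List String := transaction_data.flatMap (fun row => row)
  -- header = sorted(set(flattened_data))
  let header : List String := PySem.List.sorted (PySem.Set.ofList flattened_data) (fun x => x) false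
  -- for transaction in transaction_data: binary_data.append([1 if item in transaction else 0 for item in header])
  let binary_data : List (List Int) :=
    transaction_data.foldl
      (fun bd transaction =>
        bd ++ [header.map (fun item => if transaction.contains item then (1 : Int) else 0)]) []
  (binary_data, header)

-- ===== PORT B =====
def transaction_to_binary_alt (transaction_data : List (List String)) : List (List Int) × List String :=
  -- header = sorted({item for row in transaction_data for item in row})
  let header : List String :=
    PySem.List.sorted (PySem.Set.ofList (transaction_data.flatMap (fun row => row))) (fun x => x) false
  -- col_index = {item: i for i, item in enumerate(header)}
  let col_index : PySem.Dict String Int :=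
    (PySem.List.enumerate header).foldl (fun d p => d.insert p.2 p.1) PySem.Dict.empty
  -- for transaction in transaction_data: row = [0]*len(header); for item in transaction: row[col_index[item]] = 1
  -- col_index[item]: every item occurs in header, so the lookup never raises; getD 0 is exact here.
  let binary_data : List (List Int) :=
    transaction_data.foldl
      (fun bd transaction =>
        bd ++ [transaction.foldl
                 (fun row item => PySem.List.pySetD row (col_index.getD item 0) (1 : Int))
                 (List.replicate header.length (0 : Int))]) []
  (binary_data, header)

-- ===== PRECONDITION & SPEC =====
def Spec_transaction_to_binary (transaction_data : List (List String)) (out : List (List Int) × List String) : Prop := out = transaction_to_binary_alt transaction_data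
instance (transaction_data : List (List String)) (out : List (List Int) × List String) : Decidable (Spec_transaction_to_binary transaction_data out) := by unfold Spec_transaction_to_binary; infer_instance

-- ===== CLAIM (what is proved, stated in full; the proofs are below) =====
def Claim_equal_transaction_to_binary : Prop := ∀ (transaction_data : List (List String)), Dom_transaction_to_binary transaction_data → Spec_transaction_to_binary transaction_data (transaction_to_binary transaction_data)

-- ===== LEMMAS AND PROOFS =====

-- lookups untouched by a fold of inserts whose keys avoid x
theorem getD_foldl_insert_enum_of_not_mem (l : List String) (s : Int)
    (d : PySem.Dict String Int) (x : String) (hx : x ∉ l) :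
    ((PySem.List.enumerate l s).foldl (fun d p => d.insert p.2 p.1) d).getD x 0 = d.getD x 0 := by
  induction l generalizing s d with
  | nil => simp [PySem.List.enumerate_nil]
  | cons a t ih =>
      rw [PySem.List.enumerate_cons]
      simp only [List.foldl_cons]
      rw [ih _ _ (fun h => hx (List.mem_cons_of_mem a h))]
      exact PySem.Dict.getD_insert_of_ne _ _ _ (fun h => hx (h ▸ List.mem_cons_self))

-- the enumerate-built dict maps the j-th element to s + j (Nodup list)
theorem getD_foldl_insert_enum (l : List String) (s : Int) (d : PySem.Dict String Int)
    (hnd : l.Nodup) (j : Nat) (hj : j < l.length) :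
    ((PySem.List.enumerate l s).foldl (fun d p => d.insert p.2 p.1) d).getD l[j] 0 = s + j := by
  induction l generalizing s d j with
  | nil => simp at hj
  | cons a t ih =>
      rw [PySem.List.enumerate_cons]
      simp only [List.foldl_cons]
      rw [List.nodup_cons] at hnd
      obtain ⟨ha, hndt⟩ := hnd
      cases j with
      | zero =>
          simp only [List.getElem_cons_zero]
          rw [getD_foldl_insert_enum_of_not_mem t (s+1) _ a ha]
          simp [PySem.Dict.getD_insert_self]
      | succ k =>
          simp only [List.getElem_cons_succ]
          rw [ih (s+1) _ hndt k (by simpa using hj)]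
          push_cast; ring

-- the scatter loop: final row at k is 1 iff header[k] occurs in the processed items
theorem scatter_length (col : PySem.Dict String Int) (t : List String) (row : List Int) :
    (t.foldl (fun row item => PySem.List.pySetD row (col.getD item 0) (1 : Int)) row).length
    = row.length := by
  induction t generalizing row with
  | nil => rfl
  | cons a t ih => simp only [List.foldl_cons]; rw [ih]; exact PySem.List.length_pySetD ..

theorem scatter_getElem? (header : List String) (hnd : header.Nodup)
    (col : PySem.Dict String Int)
    (hcol : ∀ j (_ : j < header.length), col.getD header[j] 0 = (j : Int)) :
    ∀ (t : List String) (row : List Int), row.length = header.length →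
      (∀ x ∈ t, x ∈ header) → ∀ (k : Nat) (hk : k < header.length),
      (t.foldl (fun row item => PySem.List.pySetD row (col.getD item 0) (1 : Int)) row)[k]?
      = if t.contains header[k] then some 1 else row[k]? := by
  intro t
  induction t with
  | nil => intro row _ _ k hk; simp
  | cons item t ih =>
      intro row hlen hmem k hk
      simp only [List.foldl_cons]
      obtain ⟨j, hj, hjeq⟩ := List.mem_iff_getElem.mp (hmem item List.mem_cons_self)
      have hc : col.getD item 0 = (j : Int) := by rw [← hjeq]; exact hcol j hj
      rw [hc, PySem.List.pySetD_natCast]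
      rw [ih (row.set j 1) (by rw [List.length_set]; exact hlen)
            (fun x hx => hmem x (List.mem_cons_of_mem _ hx)) k hk]
      by_cases hjk : j = k
      · subst hjk
        have h1 : (row.set j 1)[j]? = some 1 := by
          simp [hlen ▸ hj]
        simp [hjeq, h1]
      · have hne : header[k] ≠ item := by
          intro h
          exact hjk (List.Nodup.getElem_inj_iff hnd |>.mp (hjeq.trans h.symm) |>.symm ▸ rfl)
        have hcn : (item :: t).contains header[k] = t.contains header[k] := by
          simp [hne]
        rw [hcn, List.getElem?_set]
        simp [hjk]

theorem transaction_to_binary_spec : Claim_equal_transaction_to_binary := by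
  intro td _
  unfold Spec_transaction_to_binary transaction_to_binary transaction_to_binary_alt
  simp only []
  set flat := td.flatMap (fun row => row) with hflat
  set header := PySem.List.sorted (PySem.Set.ofList flat) (fun x => x) false with hheader
  have hnd : header.Nodup :=
    (PySem.List.sorted_ofList_pairwise_lt flat).imp (fun h => ne_of_lt h)
  set col : PySem.Dict String Int :=
    (PySem.List.enumerate header).foldl (fun d p => d.insert p.2 p.1) PySem.Dict.empty with hcoldef
  have hcol : ∀ j (_ : j < header.length), col.getD header[j] 0 = (j : Int) := by
    intro j hj
    rw [hcoldef, getD_foldl_insert_enum header 0 PySem.Dict.empty hnd j hj]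
    ring
  refine Prod.ext ?_ rfl
  rw [PySem.List.foldl_append_singleton_eq_map
        (fun transaction => header.map (fun item => if transaction.contains item then (1:Int) else 0)) td [],
      PySem.List.foldl_append_singleton_eq_map
        (fun transaction => transaction.foldl
          (fun row item => PySem.List.pySetD row (col.getD item 0) (1 : Int))
          (List.replicate header.length (0 : Int))) td []]
  simp only [List.nil_append]
  refine List.map_congr_left ?_
  intro t ht
  have hmem : ∀ x ∈ t, x ∈ header := by
    intro x hx
    rw [hheader, PySem.List.mem_sorted]
    rw [PySem.Set.mem_ofList]
    exact List.mem_flatMap.mpr ⟨t, ht, hx⟩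
  apply List.ext_getElem?
  intro k
  by_cases hk : k < header.length
  · rw [scatter_getElem? header hnd col hcol t (List.replicate header.length 0)
          (List.length_replicate) hmem k hk]
    rw [List.getElem?_map, List.getElem?_eq_getElem hk,
        List.getElem?_eq_getElem (by simpa using hk)]
    simp only [List.getElem_replicate, Option.map_some]
    split_ifs <;> rfl
  · have h1 : header.length ≤ k := Nat.le_of_not_lt hk
    rw [List.getElem?_eq_none (by simpa using h1),
        List.getElem?_eq_none (by rw [scatter_length]; simpa using h1)]
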